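-- pv_equiv track=rewrite | github.com/Starck43/social-media-ai | app/services/ai/llm_provider_resolver.py | get_required_capabilities
-- ===== SOURCE A (Python) =====
-- def get_required_capabilities(content_types: list[str]) -> dict[str, list[str]]:
--     """
--     Determine required MediaType capabilities from ContentTypes.
--
--     Args:
--         content_types: List of ContentType values ["posts", "videos", "stories"]
--
--     Returns:
--         Dict mapping MediaType to ContentTypes that need it
--         {
--             "text": ["posts", "comments"],
--             "image": ["stories"],
--             "video": ["videos", "reels"]
--         }
--     """
--     requirements = {
--         "text": [],
--         "image": [],
--         "video": [],
--     }
--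
--     # Mapping ContentType -> required MediaType
--     content_to_media = {
--         "posts": "text",
--         "comments": "text",
--         "mentions": "text",
--         "reactions": "text",
--         "videos": "video",
--         "reels": "video",
--         "stories": "image",  # Stories can be images or short videos
--     }
--
--     for content_type in content_types:
--         media_type = content_to_media.get(content_type)
--         if media_type and content_type not in requirements[media_type]:
--             requirements[media_type].append(content_type)
--
--     # Remove empty categories
--     return {k: v for k, v in requirements.items() if v}
-- ===== SOURCE B (Python) =====
-- def get_required_capabilities(content_types: list[str]) -> dict[str, list[str]]:
--     content_to_media = {
--         "posts": "text",
--         "comments": "text",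
--         "mentions": "text",
--         "reactions": "text",
--         "videos": "video",
--         "reels": "video",
--         "stories": "image",
--     }
--     result = {}
--     for media in ("text", "image", "video"):
--         needed = list(dict.fromkeys(
--             ct for ct in content_types if content_to_media.get(ct) == media
--         ))
--         if needed:
--             result[media] = needed
--     return result
-- ===== Notes on version B (the rewrite author's own statement) =====
-- stated objective: alternative
-- what changed: Inverts the traversal: instead of one accumulating pass that appends each content type to its category if absent, B loops over the three media types in canonical order and for each one filters the input and deduplicates with dict.fromkeys, adding the category only if non-empty.
import Mathlib
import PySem

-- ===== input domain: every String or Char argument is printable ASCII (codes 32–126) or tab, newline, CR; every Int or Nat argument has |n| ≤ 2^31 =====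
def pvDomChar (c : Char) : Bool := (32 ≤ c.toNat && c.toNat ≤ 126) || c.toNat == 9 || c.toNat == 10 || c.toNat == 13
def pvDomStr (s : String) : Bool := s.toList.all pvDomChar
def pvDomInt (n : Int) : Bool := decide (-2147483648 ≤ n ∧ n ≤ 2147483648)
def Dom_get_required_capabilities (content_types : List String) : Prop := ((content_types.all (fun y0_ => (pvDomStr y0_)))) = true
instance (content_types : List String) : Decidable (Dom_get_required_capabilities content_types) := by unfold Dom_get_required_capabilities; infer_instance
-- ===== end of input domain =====

-- B restructures A's single accumulating pass into per-media-type filter+dedup passes; alternative decomposition, same cost.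

-- shared constant mapping ContentType -> MediaType (the dict literal both Pythons contain; lookup = first match = this if-chain)
def contentToMedia (ct : String) : Option String :=
  if ct = "posts" then some "text"
  else if ct = "comments" then some "text"
  else if ct = "mentions" then some "text"
  else if ct = "reactions" then some "text"
  else if ct = "videos" then some "video"
  else if ct = "reels" then some "video"
  else if ct = "stories" then some "image"
  else none

-- "append if not already present" (A's `if ct not in ...: append`; B's dict.fromkeys step)
def dedupAdd (acc : List String) (x : String) : List String :=
  if acc.contains x then acc else acc ++ [x]

-- ===== PORT A =====
-- requirements = {"text": [], "image": [], "video": []} kept as a triple (t, i, v) of its three fixed entries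
def stepA (r : List String × List String × List String) (ct : String) :
    List String × List String × List String :=
  match contentToMedia ct with
  | none => r
  | some m =>
    if m = "text" then (dedupAdd r.1 ct, r.2.1, r.2.2)
    else if m = "image" then (r.1, dedupAdd r.2.1 ct, r.2.2)
    else if m = "video" then (r.1, r.2.1, dedupAdd r.2.2 ct)
    else r

def get_required_capabilities (content_types : List String) : List (String × List String) :=
  let r := content_types.foldl stepA ([], [], [])
  -- {k: v for k, v in requirements.items() if v}
  (if r.1 = [] then [] else [("text", r.1)]) ++
  (if r.2.1 = [] then [] else [("image", r.2.1)]) ++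
  (if r.2.2 = [] then [] else [("video", r.2.2)])

-- ===== PORT B =====
def get_required_capabilities_alt (content_types : List String) : List (String × List String) :=
  ["text", "image", "video"].foldl (fun res media =>
    let needed :=
      (content_types.filter (fun ct => contentToMedia ct == some media)).foldl dedupAdd []
    if needed = [] then res else res ++ [(media, needed)]) []

-- ===== PRECONDITION & SPEC =====
def Spec_get_required_capabilities (content_types : List String) (out : List (String × List String)) : Prop := out = get_required_capabilities_alt content_types
instance (content_types : List String) (out : List (String × List String)) : Decidable (Spec_get_required_capabilities content_types out) := by unfold Spec_get_required_capabilities; infer_instance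

-- ===== CLAIM (what is proved, stated in full; the proofs are below) =====
def Claim_equal_get_required_capabilities : Prop := ∀ (content_types : List String), Dom_get_required_capabilities content_types → Spec_get_required_capabilities content_types (get_required_capabilities content_types)

-- ===== LEMMAS AND PROOFS =====

theorem contentToMedia_cases (ct : String) :
    contentToMedia ct = none ∨ contentToMedia ct = some "text" ∨
    contentToMedia ct = some "image" ∨ contentToMedia ct = some "video" := by
  unfold contentToMedia
  split_ifs <;> simp

-- A's single three-bucket pass splits into B's three per-category dedup folds over the filtered input
theorem foldA_split (cts : List String) (t i v : List String) :
    cts.foldl stepA (t, i, v) =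
      ((cts.filter (fun ct => contentToMedia ct == some "text")).foldl dedupAdd t,
       (cts.filter (fun ct => contentToMedia ct == some "image")).foldl dedupAdd i,
       (cts.filter (fun ct => contentToMedia ct == some "video")).foldl dedupAdd v) := by
  induction cts generalizing t i v with
  | nil => rfl
  | cons ct rest ih =>
    simp only [List.foldl_cons, List.filter_cons]
    rcases contentToMedia_cases ct with h | h | h | h <;>
      simp [stepA, h, ih]

theorem get_required_capabilities_eq (content_types : List String) :
    get_required_capabilities content_types = get_required_capabilities_alt content_types := by
  unfold get_required_capabilities get_required_capabilities_alt
  simp only [List.foldl_cons, List.foldl_nil, foldA_split]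
  split_ifs <;> simp_all

-- ===== VERDICT (by name: the statement is the Claim_ definition above) =====
theorem get_required_capabilities_spec : Claim_equal_get_required_capabilities := by
  intro cts _
  exact get_required_capabilities_eq cts
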